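-- pv_equiv track=rewrite | github.com/NoeCoursi/MicroTPCT | benchmark/bench_functions.py | run_find_mem
-- ===== SOURCE A (Python) =====
-- def run_find_mem(peptides, proteome):
--     """
--     peptides : list[str]
--     proteome : list[(protein_id, sequence)]
--     """
--     # Prepare results dict: peptide -> list of (protein_id, position)
--     results = {pep: [] for pep in peptides}
--
--     for protein_id, seq in proteome:
--         seq = str(seq)
--         for pep in peptides:
--             start = 0
--             while True:
--                 start = seq.find(pep, start)
--                 if start == -1:
--                     break
--                 results.setdefault(pep, []).append((protein_id, start))
--                 start += 1
--
--     return results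
-- ===== SOURCE B (Python) =====
-- def run_find_mem(peptides, proteome):
--     """
--     peptides : list[str]
--     proteome : list[(protein_id, sequence)]
--     """
--     results = {pep: [] for pep in peptides}
--     lengths = sorted({len(p) for p in peptides})
--     pepset = set(peptides)
--
--     for protein_id, seq in proteome:
--         seq = str(seq)
--         n = len(seq)
--         # one sliding-window pass per distinct peptide length, hash lookups
--         occ = {}
--         for L in lengths:
--             for i in range(n - L + 1):
--                 sub = seq[i:i + L]
--                 if sub in pepset:
--                     occ.setdefault(sub, []).append(i)
--         for pep in peptides:
--             results[pep].extend((protein_id, i) for i in occ.get(pep, ()))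
--
--     return results
-- ===== Notes on version B (the rewrite author's own statement) =====
-- stated objective: alternative
-- what changed: Instead of running a separate repeated-find scan of every sequence for every peptide, B builds per protein a hash index (one sliding-window pass per distinct peptide length, collecting positions of windows that are peptides) and then reads each peptide's positions out of the index.
import Mathlib
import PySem

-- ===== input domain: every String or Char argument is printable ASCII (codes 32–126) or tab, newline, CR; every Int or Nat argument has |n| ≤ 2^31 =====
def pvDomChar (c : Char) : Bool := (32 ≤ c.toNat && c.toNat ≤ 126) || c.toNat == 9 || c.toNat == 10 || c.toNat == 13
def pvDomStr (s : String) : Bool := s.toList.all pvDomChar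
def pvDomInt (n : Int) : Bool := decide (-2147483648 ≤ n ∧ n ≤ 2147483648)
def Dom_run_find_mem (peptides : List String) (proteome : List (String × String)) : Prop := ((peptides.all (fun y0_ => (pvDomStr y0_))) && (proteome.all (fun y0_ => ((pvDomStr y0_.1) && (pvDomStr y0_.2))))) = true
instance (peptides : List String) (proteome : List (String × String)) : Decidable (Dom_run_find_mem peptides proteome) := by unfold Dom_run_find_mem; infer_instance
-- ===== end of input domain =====

-- B replaces A's per-peptide find-scans of every sequence by a per-protein substring index
-- (one sliding-window pass per distinct peptide length); same return value, proved below.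

-- ===== PORT A =====

-- findFrom with a Nat start past the length returns -1 (CPython rule); needed for termination.
theorem pvFindFrom_neg_of_gt (seq sub : List Char) (k : Nat) (h : seq.length < k) :
    PySem.Chars.findFrom seq sub (k : Int) = -1 := by
  simp only [PySem.Chars.findFrom]
  split_ifs <;> omega

-- when findFrom succeeds from a Nat start, the hit is ≥ start and ≤ length (termination facts)
theorem pvFindFrom_bounds (seq sub : List Char) (k : Nat)
    (h : PySem.Chars.findFrom seq sub (k : Int) ≠ -1) :
    k ≤ seq.length ∧ k ≤ (PySem.Chars.findFrom seq sub (k : Int)).toNat ∧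
      (PySem.Chars.findFrom seq sub (k : Int)).toNat ≤ seq.length := by
  by_cases hk : k ≤ seq.length
  · have hrw := PySem.Chars.findFrom_natCast seq sub k hk
    rw [hrw] at h ⊢
    have hle := PySem.Chars.find_le_length (seq.drop k) sub
    have hge := PySem.Chars.neg_one_le_find (seq.drop k) sub
    rw [List.length_drop] at hle
    split at h
    · exact absurd rfl h
    · next hne =>
      rw [if_neg hne]
      omega
  · exact absurd (pvFindFrom_neg_of_gt seq sub k (by omega)) h

-- A's inner 'while True' loop: start = seq.find(pep, start); if -1 break;
-- results.setdefault(pep, []).append((pid, start)); start += 1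
def pvALoop (pid : String) (seq : List Char) (pep : String) (start : Nat)
    (d : PySem.Dict String (List (String × Int))) : PySem.Dict String (List (String × Int)) :=
  let f := PySem.Chars.findFrom seq pep.toList (start : Int)
  if h : f = -1 then d
  else pvALoop pid seq pep (f.toNat + 1) (d.modify pep [] (fun v => v ++ [(pid, f)]))
termination_by seq.length + 1 - start
decreasing_by
  have := pvFindFrom_bounds seq pep.toList start h
  omega

def run_find_mem (peptides : List String) (proteome : List (String × String)) :
    List (String × List (String × Int)) :=
  -- results = {pep: [] for pep in peptides}
  let results := peptides.foldl (fun d pep => d.insert pep []) PySem.Dict.empty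
  -- for protein_id, seq in proteome: for pep in peptides: <while-loop>
  (proteome.foldl (fun d pr =>
      peptides.foldl (fun d pep => pvALoop pr.1 pr.2.toList pep 0 d) d)
    results).items

-- ===== PORT B =====

-- per-protein index: for L in lengths: for i in range(n-L+1):
--   sub = seq[i:i+L];  if sub in pepset: occ.setdefault(sub, []).append(i)
def pvBIndex (pepset : PySem.Set String) (lengths : List Int) (seq : List Char) :
    PySem.Dict String (List Int) :=
  lengths.foldl (fun occ L =>
    (PySem.List.pyRange 0 ((seq.length : Int) - L + 1)).foldl (fun occ i =>
      let sub := String.ofList (PySem.List.slice seq (some i) (some (i + L)))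
      if pepset.contains sub then occ.modify sub [] (fun v => v ++ [i]) else occ)
    occ) PySem.Dict.empty

def run_find_mem_alt (peptides : List String) (proteome : List (String × String)) :
    List (String × List (String × Int)) :=
  let results := peptides.foldl (fun d pep => d.insert pep []) PySem.Dict.empty
  let lengths := PySem.List.sorted (PySem.Set.ofList (peptides.map PySem.Str.len)) (fun x => x)
  let pepset : PySem.Set String := PySem.Set.ofList peptides
  (proteome.foldl (fun d pr =>
      let occ := pvBIndex pepset lengths pr.2.toList
      -- results[pep].extend(...): pep is always a key of results, so this equals the modify below
      peptides.foldl (fun d pep =>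
        d.modify pep [] (fun v => v ++ (occ.getD pep []).map (fun i => (pr.1, i)))) d)
    results).items

-- ===== PRECONDITION & SPEC =====
def Spec_run_find_mem (peptides : List String) (proteome : List (String × String)) (out : List (String × List (String × Int))) : Prop := out = run_find_mem_alt peptides proteome
instance (peptides : List String) (proteome : List (String × String)) (out : List (String × List (String × Int))) : Decidable (Spec_run_find_mem peptides proteome out) := by unfold Spec_run_find_mem; infer_instance

-- ===== CLAIM (what is proved, stated in full; the proofs are below) =====
def Claim_equal_run_find_mem : Prop := ∀ (peptides : List String) (proteome : List (String × String)), Dom_run_find_mem peptides proteome → Spec_run_find_mem peptides proteome (run_find_mem peptides proteome)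

-- ===== LEMMAS AND PROOFS =====

-- the occurrence positions of pep in seq, ascending (i = seq.length included for pep = [])
def pvPos (seq pep : List Char) : List Nat :=
  (List.range (seq.length + 1)).filter (fun i => decide (pep <+: seq.drop i))

theorem pvDict_eq_of_items {κ ν : Type} [BEq κ] (d1 d2 : PySem.Dict κ ν)
    (h : d1.items = d2.items) : d1 = d2 := by
  cases d1; cases d2; cases h; rfl

theorem pvInsert_insert_self {κ ν : Type} [BEq κ] [LawfulBEq κ] (d : PySem.Dict κ ν)
    (k : κ) (v w : ν) : (d.insert k v).insert k w = d.insert k w := by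
  apply pvDict_eq_of_items
  by_cases h : d.contains k = true
  · rw [PySem.Dict.items_insert_of_contains _ _ (PySem.Dict.contains_insert_self d k v),
        PySem.Dict.items_insert_of_contains _ _ h, PySem.Dict.items_insert_of_contains _ _ h,
        List.map_map]
    apply List.map_congr_left
    intro p _
    by_cases hp : (p.1 == k) = true <;> simp [hp]
  · rw [PySem.Dict.items_insert_of_contains _ _ (PySem.Dict.contains_insert_self d k v),
        PySem.Dict.items_insert_of_not_contains _ _ (by simpa using h),
        PySem.Dict.items_insert_of_not_contains _ _ (by simpa using h), List.map_append]
    have hnone : ∀ p ∈ d.items, (p.1 == k) = false := by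
      intro p hp
      by_contra hc
      rw [Bool.not_eq_false] at hc
      exact h (List.any_eq_true.mpr ⟨p, hp, hc⟩)
    congr 1
    · have h1 : List.map (fun p => if (p.1 == k) = true then (k, w) else p) d.items =
          List.map (fun p => p) d.items :=
        List.map_congr_left (fun p hp => by simp [hnone p hp])
      rw [h1, List.map_id']
    · simp

theorem pvModify_modify_self {κ ν : Type} [BEq κ] [LawfulBEq κ] (d : PySem.Dict κ ν)
    (k : κ) (d0 : ν) (f g : ν → ν) :
    (d.modify k d0 f).modify k d0 g = d.modify k d0 (fun v => g (f v)) := by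
  show ((d.modify k d0 f)).insert k (g ((d.modify k d0 f).getD k d0)) = _
  rw [PySem.Dict.getD_modify_self]
  show (d.insert k (f (d.getD k d0))).insert k (g (f (d.getD k d0))) = d.insert k (g (f (d.getD k d0)))
  exact pvInsert_insert_self d k _ _

theorem pvInsert_getD_self_of_contains {κ ν : Type} [BEq κ] [LawfulBEq κ]
    (d : PySem.Dict κ ν) (k : κ) (d0 : ν) (hk : d.contains k = true)
    (hnd : d.keys.Nodup) : d.insert k (d.getD k d0) = d := by
  apply pvDict_eq_of_items
  rw [PySem.Dict.items_insert_of_contains _ _ hk]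
  have : ∀ p ∈ d.items, (if (p.1 == k) = true then (k, d.getD k d0) else p) = p := by
    intro p hp
    by_cases hpk : (p.1 == k) = true
    · have hk1 : p.1 = k := by simpa using hpk
      have hmem : (k, p.2) ∈ d.items := by rw [← hk1]; exact hp
      rw [if_pos hpk, PySem.Dict.getD_of_mem_items d hmem hnd d0, ← hk1]
    · rw [if_neg hpk]
  rw [List.map_congr_left this]
  simp

-- a run of single-element appends at one present key is one concatenated append
theorem pvAppendFold {α : Type} (k : String) (g : α → String × Int) :
    ∀ (xs : List α) (d : PySem.Dict String (List (String × Int))),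
      d.contains k = true → d.keys.Nodup →
      xs.foldl (fun d x => d.modify k [] (fun v => v ++ [g x])) d =
        d.modify k [] (fun v => v ++ xs.map g) := by
  intro xs
  induction xs with
  | nil =>
    intro d hk hnd
    simp only [List.foldl_nil, List.map_nil]
    show d = d.insert k (d.getD k [] ++ [])
    rw [List.append_nil, pvInsert_getD_self_of_contains d k [] hk hnd]
  | cons x xs ih =>
    intro d hk hnd
    simp only [List.foldl_cons, List.map_cons]
    rw [ih _ (by rw [PySem.Dict.contains_modify]; simp [hk])
          (by rw [PySem.Dict.keys_modify]; exact PySem.Dict.nodup_keys_insert _ _ _ hnd),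
        pvModify_modify_self]
    congr 1
    funext v
    simp

-- ---- characterisation of A's find loop ----

theorem pvMem_pvPos (seq pep : List Char) (i : Nat) :
    i ∈ pvPos seq pep ↔ i < seq.length + 1 ∧ pep <+: seq.drop i := by
  simp [pvPos, List.mem_filter]

theorem pvPrefix_drop_infix (seq pep : List Char) (k i : Nat) (hki : k ≤ i)
    (h : pep <+: seq.drop i) : pep <:+: seq.drop k := by
  have : (seq.drop k).drop (i - k) = seq.drop i := by rw [List.drop_drop]; congr 1; omega
  rw [← this] at h
  obtain ⟨r, hr⟩ := h
  exact ⟨(seq.drop k).take (i - k), r, by rw [List.append_assoc, hr, List.take_append_drop]⟩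

-- splitting a bounded filter at its minimal element
theorem pvFilter_cons_min (N a s : Nat) (p : Nat → Bool) (hsa : s ≤ a) (haN : a < N)
    (hpa : p a = true) (hmin : ∀ i, s ≤ i → i < a → p i = false) :
    (List.range N).filter (fun i => decide (s ≤ i) && p i) =
      a :: (List.range N).filter (fun i => decide (a + 1 ≤ i) && p i) := by
  have hN : N = (a + 1) + (N - (a + 1)) := by omega
  rw [hN, List.range_add, List.filter_append, List.filter_append, List.range_succ,
      List.filter_append, List.filter_append]
  have h1 : (List.range a).filter (fun i => decide (s ≤ i) && p i) = [] := by
    rw [List.filter_eq_nil_iff]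
    intro i hi
    rw [List.mem_range] at hi
    by_cases hs : s ≤ i
    · simp [hmin i hs hi]
    · simp [hs]
  have h2 : (List.range a).filter (fun i => decide (a + 1 ≤ i) && p i) = [] := by
    rw [List.filter_eq_nil_iff]
    intro i hi
    rw [List.mem_range] at hi
    simp [show ¬ (a + 1 ≤ i) by omega]
  have h3 : [a].filter (fun i => decide (s ≤ i) && p i) = [a] := by simp [hpa, hsa]
  have h4 : [a].filter (fun i => decide (a + 1 ≤ i) && p i) = [] := by simp
  have h5 : ((List.range (N - (a + 1))).map (fun x => (a + 1) + x)).filter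
        (fun i => decide (s ≤ i) && p i) =
      ((List.range (N - (a + 1))).map (fun x => (a + 1) + x)).filter
        (fun i => decide (a + 1 ≤ i) && p i) := by
    apply List.filter_congr
    intro i hi
    obtain ⟨x, _, rfl⟩ := List.mem_map.mp hi
    simp [show s ≤ a + 1 + x by omega, show a + 1 ≤ a + 1 + x by omega]
  rw [h1, h2, h3, h4, h5]
  simp

theorem pvALoop_eq (pid : String) (seq : List Char) (pep : String) :
    ∀ (fuel start : Nat) (d : PySem.Dict String (List (String × Int))),
      seq.length + 1 - start ≤ fuel →
      pvALoop pid seq pep start d =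
        ((pvPos seq pep.toList).filter (fun i => decide (start ≤ i))).foldl
          (fun d i => d.modify pep [] (fun v => v ++ [(pid, (i : Int))])) d := by
  intro fuel
  induction fuel with
  | zero =>
    intro start d hf
    have hs : seq.length < start := by omega
    rw [pvALoop]
    rw [dif_pos (pvFindFrom_neg_of_gt seq pep.toList start hs)]
    have : (pvPos seq pep.toList).filter (fun i => decide (start ≤ i)) = [] := by
      rw [List.filter_eq_nil_iff]
      intro i hi
      have := (pvMem_pvPos seq pep.toList i).mp hi
      simp; omega
    rw [this]; rfl
  | succ fuel ih =>
    intro start d hf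
    rw [pvALoop]
    by_cases h : PySem.Chars.findFrom seq pep.toList (start : Int) = -1
    · rw [dif_pos h]
      have hnil : (pvPos seq pep.toList).filter (fun i => decide (start ≤ i)) = [] := by
        rw [List.filter_eq_nil_iff]
        intro i hi hdec
        have hmem := (pvMem_pvPos seq pep.toList i).mp hi
        have hsi : start ≤ i := by simpa using hdec
        by_cases hk : start ≤ seq.length
        · have hniff := (PySem.Chars.findFrom_natCast_eq_neg_one_iff seq pep.toList start hk).mp h
          exact hniff (pvPrefix_drop_infix seq pep.toList start i hsi hmem.2)
        · omega
      rw [hnil]; rfl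
    · rw [dif_neg h]
      obtain ⟨hk, hge, hle⟩ := pvFindFrom_bounds seq pep.toList start h
      set f := PySem.Chars.findFrom seq pep.toList (start : Int) with hfdef
      obtain ⟨hf1, hf2, hf3⟩ := PySem.Chars.findFrom_natCast_spec seq pep.toList start hk h
      have hsplit : (pvPos seq pep.toList).filter (fun i => decide (start ≤ i)) =
          f.toNat :: (pvPos seq pep.toList).filter (fun i => decide (f.toNat + 1 ≤ i)) := by
        unfold pvPos
        rw [List.filter_filter, List.filter_filter]
        exact pvFilter_cons_min (seq.length + 1) f.toNat start
          (fun i => decide (pep.toList <+: seq.drop i)) hge (by omega)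
          (by simpa using hf2) (fun i h1 h2 => by simpa using hf3 i h1 h2)
      rw [hsplit, List.foldl_cons]
      have hfint : ((f.toNat : Int)) = f := by omega
      rw [ih (f.toNat + 1) _ (by omega)]
      congr 2
      rw [hfint]

-- ---- characterisation of B's index ----

theorem pvSlice_eq_iff (seq pep : List Char) (i : Nat) :
    PySem.List.slice seq (some (i : Int)) (some ((i : Int) + (pep.length : Int))) = pep ↔
      pep <+: seq.drop i := by
  have hcast : ((i : Int) + (pep.length : Int)) = ((i + pep.length : Nat) : Int) := by push_cast; ring
  rw [hcast, PySem.List.slice_natCast]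
  have : i + pep.length - i = pep.length := by omega
  rw [this]
  rw [List.prefix_iff_eq_take]
  exact ⟨fun h => h.symm, fun h => h.symm⟩

-- the inner window pass for the length equal to pep's length collects exactly pep's positions
theorem pvPassCollect (pepset : PySem.Set String) (seq : List Char) (pep : String)
    (hpep : pepset.contains pep = true) :
    ∀ (is : List Nat) (occ : PySem.Dict String (List Int)),
      (is.foldl (fun occ (i : Nat) =>
          let sub := String.ofList (PySem.List.slice seq (some ((i : Nat) : Int))
            (some (((i : Nat) : Int) + (pep.toList.length : Int))))
          if pepset.contains sub then occ.modify sub [] (fun v => v ++ [((i : Nat) : Int)]) else occ)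
        occ).getD pep [] =
      occ.getD pep [] ++
        ((is.filter (fun i => decide (pep.toList <+: seq.drop i))).map (fun i => ((i : Nat) : Int))) := by
  intro is
  induction is with
  | nil => intro occ; simp
  | cons i is ih =>
    intro occ
    simp only [List.foldl_cons]
    by_cases hp : pep.toList <+: seq.drop i
    · have hslice : PySem.List.slice seq (some (i : Int)) (some ((i : Int) + (pep.toList.length : Int))) = pep.toList :=
        (pvSlice_eq_iff seq pep.toList i).mpr hp
      simp only [hslice, String.ofList_toList]
      rw [if_pos hpep, ih, PySem.Dict.getD_modify_self]
      simp [hp]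
    · have hsub : String.ofList (PySem.List.slice seq (some (i : Int)) (some ((i : Int) + (pep.toList.length : Int)))) ≠ pep := by
        intro hc
        apply hp
        have h2 : PySem.List.slice seq (some (i : Int)) (some ((i : Int) + (pep.toList.length : Int))) = pep.toList := by
          have := congrArg String.toList hc
          rwa [String.toList_ofList] at this
        exact (pvSlice_eq_iff seq pep.toList i).mp h2
      rw [ih _]
      have hkey : ((if pepset.contains (String.ofList (PySem.List.slice seq (some (i : Int)) (some ((i : Int) + (pep.toList.length : Int))))) = true
            then occ.modify (String.ofList (PySem.List.slice seq (some (i : Int)) (some ((i : Int) + (pep.toList.length : Int))))) [] (fun v => v ++ [((i : Nat) : Int)])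
            else occ) : PySem.Dict String (List Int)).getD pep [] = occ.getD pep [] := by
        split
        · exact PySem.Dict.getD_modify_of_ne occ [] _ (fun h2 => hsub h2.symm)
        · rfl
      rw [hkey, List.filter_cons_of_neg (by simp [hp])]

-- a window pass for a length different from pep's length never touches pep's entry
theorem pvPassPreserve (pepset : PySem.Set String) (seq : List Char) (pep : String)
    (L : Int) (hL0 : 0 ≤ L) (hLne : L ≠ (pep.toList.length : Int)) :
    ∀ (is : List Nat), (∀ i ∈ is, ((i : Int)) + L ≤ (seq.length : Int)) →
      ∀ (occ : PySem.Dict String (List Int)),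
      (is.foldl (fun occ (i : Nat) =>
          let sub := String.ofList (PySem.List.slice seq (some ((i : Nat) : Int))
            (some (((i : Nat) : Int) + L)))
          if pepset.contains sub then occ.modify sub [] (fun v => v ++ [((i : Nat) : Int)]) else occ)
        occ).getD pep [] = occ.getD pep [] := by
  intro is
  induction is with
  | nil => intro _ occ; rfl
  | cons i is ih =>
    intro hb occ
    simp only [List.foldl_cons]
    have hi : ((i : Int)) + L ≤ (seq.length : Int) := hb i (by simp)
    have hsub : String.ofList (PySem.List.slice seq (some (i : Int)) (some ((i : Int) + L))) ≠ pep := by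
      intro hc
      have hcast : ((i : Int) + L) = ((i + L.toNat : Nat) : Int) := by push_cast; omega
      have hslice : PySem.List.slice seq (some (i : Int)) (some ((i : Int) + L)) =
          (seq.drop i).take (i + L.toNat - i) := by rw [hcast, PySem.List.slice_natCast]
      have hlen : (PySem.List.slice seq (some (i : Int)) (some ((i : Int) + L))).length = L.toNat := by
        rw [hslice, List.length_take, List.length_drop]
        omega
      have := congrArg (fun s => s.toList.length) hc
      simp only [String.toList_ofList] at this
      rw [hlen] at this
      omega
    rw [ih (fun j hj => hb j (by simp [hj]))]
    split
    · exact PySem.Dict.getD_modify_of_ne occ [] _ (fun h2 => hsub h2.symm)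
    · rfl

-- lengths not containing pep's length leave pep's entry alone
theorem pvRestPreserve (pepset : PySem.Set String) (seq : List Char) (pep : String) :
    ∀ (Ls : List Int), (∀ L ∈ Ls, 0 ≤ L) → (pep.toList.length : Int) ∉ Ls →
      ∀ (occ : PySem.Dict String (List Int)),
      (Ls.foldl (fun occ L =>
          (PySem.List.pyRange 0 ((seq.length : Int) - L + 1)).foldl (fun occ i =>
            let sub := String.ofList (PySem.List.slice seq (some i) (some (i + L)))
            if pepset.contains sub then occ.modify sub [] (fun v => v ++ [i]) else occ)
          occ) occ).getD pep [] = occ.getD pep [] := by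
  intro Ls
  induction Ls with
  | nil => intro _ _ occ; rfl
  | cons L Ls ih =>
    intro hnn hnm occ
    simp only [List.foldl_cons]
    rw [ih (fun L' h => hnn L' (List.mem_cons_of_mem L h)) (fun h => hnm (List.mem_cons_of_mem L h))]
    rw [PySem.List.pyRange_one]
    simp only [zero_add, Int.sub_zero]
    rw [List.foldl_map]
    exact pvPassPreserve pepset seq pep L (hnn L (List.mem_cons_self ..))
      (fun h => hnm (by rw [h]; exact List.mem_cons_self ..))
      _ (fun i hi => by rw [List.mem_range] at hi; omega) occ

-- the index fold over a nodup list of admissible lengths, as seen from pep's entry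
theorem pvLengthsFold (pepset : PySem.Set String) (seq : List Char) (pep : String)
    (hpep : pepset.contains pep = true) :
    ∀ (Ls : List Int) (occ : PySem.Dict String (List Int)), Ls.Nodup → (∀ L ∈ Ls, 0 ≤ L) →
      (Ls.foldl (fun occ L =>
          (PySem.List.pyRange 0 ((seq.length : Int) - L + 1)).foldl (fun occ i =>
            let sub := String.ofList (PySem.List.slice seq (some i) (some (i + L)))
            if pepset.contains sub then occ.modify sub [] (fun v => v ++ [i]) else occ)
          occ) occ).getD pep [] =
      occ.getD pep [] ++
        (if (pep.toList.length : Int) ∈ Ls then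
          ((List.range (((seq.length : Int) - (pep.toList.length : Int) + 1).toNat)).filter
              (fun i => decide (pep.toList <+: seq.drop i))).map (fun i => ((i : Nat) : Int))
        else []) := by
  intro Ls
  induction Ls with
  | nil => intro occ _ _; simp
  | cons L Ls ih =>
    intro occ hnd hnn
    simp only [List.foldl_cons]
    by_cases hLp : L = (pep.toList.length : Int)
    · subst hLp
      have hnotin : (pep.toList.length : Int) ∉ Ls := (List.nodup_cons.mp hnd).1
      rw [if_pos (by simp)]
      rw [pvRestPreserve pepset seq pep Ls (fun L' h => hnn L' (List.mem_cons_of_mem _ h)) hnotin]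
      rw [PySem.List.pyRange_one]
      simp only [zero_add, Int.sub_zero]
      rw [List.foldl_map]
      exact pvPassCollect pepset seq pep hpep _ occ
    · rw [ih _ (List.nodup_cons.mp hnd).2 (fun L' h => hnn L' (List.mem_cons_of_mem L h))]
      have hmem : ((pep.toList.length : Int) ∈ L :: Ls) ↔ ((pep.toList.length : Int) ∈ Ls) :=
        ⟨fun h => (List.mem_cons.mp h).resolve_left (fun e => hLp e.symm),
         fun h => List.mem_cons_of_mem _ h⟩
      rw [show ((PySem.List.pyRange 0 ((seq.length : Int) - L + 1)).foldl (fun occ i =>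
            let sub := String.ofList (PySem.List.slice seq (some i) (some (i + L)))
            if pepset.contains sub then occ.modify sub [] (fun v => v ++ [i]) else occ)
          occ).getD pep [] = occ.getD pep [] from by
        rw [PySem.List.pyRange_one]
        simp only [zero_add, Int.sub_zero]
        rw [List.foldl_map]
        exact pvPassPreserve pepset seq pep L (hnn L (by simp)) (fun h => hLp h)
          _ (fun i hi => by rw [List.mem_range] at hi; omega) occ]
      congr 1
      exact (if_congr hmem rfl rfl).symm

-- a bounded filter of a longer range is the same when the predicate fails past the bound
theorem pvFilter_range_mono (K N : Nat) (p : Nat → Bool) (hKN : K ≤ N)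
    (hfalse : ∀ i, K ≤ i → i < N → p i = false) :
    (List.range N).filter p = (List.range K).filter p := by
  rw [show N = K + (N - K) by omega, List.range_add, List.filter_append]
  have h0 : ((List.range (N - K)).map (fun x => K + x)).filter p = [] := by
    rw [List.filter_eq_nil_iff]
    intro a ha
    obtain ⟨x, hx, rfl⟩ := List.mem_map.mp ha
    rw [List.mem_range] at hx
    simp [hfalse (K + x) (by omega) (by omega)]
  rw [h0, List.append_nil]

-- B's index holds exactly pep's occurrence positions, for every pep among the peptides
theorem pvIndexGetD (peptides : List String) (pep : String) (hmem : pep ∈ peptides)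
    (seq : List Char) :
    (pvBIndex (PySem.Set.ofList peptides)
        (PySem.List.sorted (PySem.Set.ofList (peptides.map PySem.Str.len)) (fun x => x))
        seq).getD pep [] =
      (pvPos seq pep.toList).map (fun i => ((i : Nat) : Int)) := by
  unfold pvBIndex
  have hset : (PySem.Set.ofList peptides).contains pep = true :=
    (PySem.Set.contains_iff _ _).mpr ((PySem.Set.mem_ofList _ _).mpr hmem)
  have hnd : (PySem.List.sorted (PySem.Set.ofList (peptides.map PySem.Str.len)) (fun x => x)).Nodup :=
    (List.Perm.nodup_iff (PySem.List.sorted_perm _ _ _)).mpr (PySem.Set.nodup_ofList _)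
  have hnn : ∀ L ∈ PySem.List.sorted (PySem.Set.ofList (peptides.map PySem.Str.len)) (fun x => x),
      0 ≤ L := by
    intro L hL
    have := (PySem.Set.mem_ofList _ _).mp ((PySem.List.mem_sorted _ _ _ _).mp hL)
    obtain ⟨q, _, rfl⟩ := List.mem_map.mp this
    rw [PySem.Str.len_eq]
    omega
  have hin : (pep.toList.length : Int) ∈
      PySem.List.sorted (PySem.Set.ofList (peptides.map PySem.Str.len)) (fun x => x) := by
    rw [PySem.List.mem_sorted, PySem.Set.mem_ofList]
    rw [← PySem.Str.len_eq]
    exact List.mem_map_of_mem hmem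
  rw [pvLengthsFold _ seq pep hset _ PySem.Dict.empty hnd hnn, if_pos hin,
      PySem.Dict.getD_empty, List.nil_append]
  have hK : ((seq.length : Int) - (pep.toList.length : Int) + 1).toNat ≤ seq.length + 1 := by omega
  have hfalse : ∀ i, ((seq.length : Int) - (pep.toList.length : Int) + 1).toNat ≤ i →
      i < seq.length + 1 → (decide (pep.toList <+: seq.drop i)) = false := by
    intro i hi hiN
    rw [decide_eq_false_iff_not]
    intro hpre
    have hlen := hpre.length_le
    rw [List.length_drop] at hlen
    omega
  rw [pvPos, pvFilter_range_mono _ _ _ hK hfalse]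

-- the initial dict {pep: [] for pep in peptides}
theorem pvInitContains : ∀ (ps : List String) (d : PySem.Dict String (List (String × Int)))
    (p : String), (p ∈ ps ∨ d.contains p = true) →
    (ps.foldl (fun d pep => d.insert pep []) d).contains p = true := by
  intro ps
  induction ps with
  | nil => intro d p h; simpa using h
  | cons q ps ih =>
    intro d p h
    simp only [List.foldl_cons]
    apply ih
    rcases h with h | h
    · rcases List.mem_cons.mp h with h | h
      · right; rw [PySem.Dict.contains_insert]; simp [h]
      · left; exact h
    · right; rw [PySem.Dict.contains_insert]; simp [h]

theorem pvInitNodup : ∀ (ps : List String) (d : PySem.Dict String (List (String × Int))),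
    d.keys.Nodup → (ps.foldl (fun d pep => d.insert pep []) d).keys.Nodup := by
  intro ps
  induction ps with
  | nil => intro d h; exact h
  | cons q ps ih =>
    intro d h
    exact ih _ (PySem.Dict.nodup_keys_insert _ _ _ h)

-- the per-protein B update preserves key structure
theorem pvModFoldNodup (M : String → List (String × Int)) :
    ∀ (peps : List String) (d : PySem.Dict String (List (String × Int))), d.keys.Nodup →
      (peps.foldl (fun d pep => d.modify pep [] (fun v => v ++ M pep)) d).keys.Nodup := by
  intro peps
  induction peps with
  | nil => intro d h; exact h
  | cons pep peps ih =>
    intro d h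
    simp only [List.foldl_cons]
    apply ih
    rw [PySem.Dict.keys_modify]
    exact PySem.Dict.nodup_keys_insert _ _ _ h

theorem pvModFoldContains (M : String → List (String × Int)) :
    ∀ (peps : List String) (d : PySem.Dict String (List (String × Int))) (q : String),
      d.contains q = true →
      (peps.foldl (fun d pep => d.modify pep [] (fun v => v ++ M pep)) d).contains q = true := by
  intro peps
  induction peps with
  | nil => intro d q h; exact h
  | cons pep peps ih =>
    intro d q h
    simp only [List.foldl_cons]
    apply ih
    rw [PySem.Dict.contains_modify]
    simp [h]

-- A's per-protein pass equals one concatenated append per peptide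
theorem pvAFoldEq (pid : String) (seq : List Char) :
    ∀ (peps : List String) (d : PySem.Dict String (List (String × Int))), d.keys.Nodup →
      (∀ p ∈ peps, d.contains p = true) →
      peps.foldl (fun d pep => pvALoop pid seq pep 0 d) d =
        peps.foldl (fun d pep =>
          d.modify pep [] (fun v => v ++ (pvPos seq pep.toList).map (fun i => (pid, ((i : Nat) : Int))))) d := by
  intro peps
  induction peps with
  | nil => intro d _ _; rfl
  | cons pep peps ih =>
    intro d hnd hc
    simp only [List.foldl_cons]
    have h1 : pvALoop pid seq pep 0 d =
        d.modify pep [] (fun v => v ++ (pvPos seq pep.toList).map (fun i => (pid, ((i : Nat) : Int)))) := by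
      rw [pvALoop_eq pid seq pep (seq.length + 1) 0 d (by omega)]
      rw [show (pvPos seq pep.toList).filter (fun i => decide (0 ≤ i)) = pvPos seq pep.toList from
        List.filter_eq_self.mpr (fun a _ => by simp)]
      exact pvAppendFold pep (fun i => (pid, ((i : Nat) : Int))) (pvPos seq pep.toList) d
        (hc pep (List.mem_cons_self ..)) hnd
    rw [h1]
    exact ih _
      (by rw [PySem.Dict.keys_modify]; exact PySem.Dict.nodup_keys_insert _ _ _ hnd)
      (fun p hp => by
        rw [PySem.Dict.contains_modify]
        simp [hc p (List.mem_cons_of_mem _ hp)])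

-- the two proteome folds agree on any dict containing all peptides as keys
theorem pvProtFold (peptides : List String) :
    ∀ (prots : List (String × String)) (d : PySem.Dict String (List (String × Int))),
      d.keys.Nodup → (∀ p ∈ peptides, d.contains p = true) →
      prots.foldl (fun d pr =>
          peptides.foldl (fun d pep => pvALoop pr.1 pr.2.toList pep 0 d) d) d =
        prots.foldl (fun d pr =>
          peptides.foldl (fun d pep =>
            d.modify pep [] (fun v => v ++
              ((pvBIndex (PySem.Set.ofList peptides)
                  (PySem.List.sorted (PySem.Set.ofList (peptides.map PySem.Str.len)) (fun x => x))
                  pr.2.toList).getD pep []).map (fun i => (pr.1, i)))) d) d := by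
  intro prots
  induction prots with
  | nil => intro d _ _; rfl
  | cons pr prots ih =>
    intro d hnd hc
    simp only [List.foldl_cons]
    have hB : peptides.foldl (fun d pep => pvALoop pr.1 pr.2.toList pep 0 d) d =
        peptides.foldl (fun d pep =>
          d.modify pep [] (fun v => v ++
            ((pvBIndex (PySem.Set.ofList peptides)
                (PySem.List.sorted (PySem.Set.ofList (peptides.map PySem.Str.len)) (fun x => x))
                pr.2.toList).getD pep []).map (fun i => (pr.1, i)))) d := by
      rw [pvAFoldEq pr.1 pr.2.toList peptides d hnd hc]
      apply PySem.List.foldl_congr_mem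
      intro acc pep hpep
      rw [pvIndexGetD peptides pep hpep pr.2.toList, List.map_map]
      rfl
    rw [hB]
    exact ih _ (pvModFoldNodup _ peptides d hnd)
      (fun p hp => pvModFoldContains _ peptides d p (hc p hp))

-- ===== VERDICT (by name: the statement is the Claim_ definition above) =====
theorem run_find_mem_spec : Claim_equal_run_find_mem := by
  intro peptides proteome _
  show run_find_mem peptides proteome = run_find_mem_alt peptides proteome
  simp only [run_find_mem, run_find_mem_alt]
  exact congrArg PySem.Dict.items
    (pvProtFold peptides proteome _
      (pvInitNodup peptides PySem.Dict.empty (by rw [PySem.Dict.keys_empty]; exact List.nodup_nil))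
      (fun p hp => pvInitContains peptides PySem.Dict.empty p (Or.inl hp)))
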